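-- pv_equiv track=rewrite | github.com/Exahilosys/ghostr | ghostr/helpers.py | match_index
-- ===== SOURCE A (Python) =====
-- def _is_ghost(index):
--
--     return index % 2
--
-- def inspect(values):
--
--     for (index, value) in enumerate(values):
--         yield (_is_ghost(index), value)
--
-- def exclude(values):
--
--     for (ghost, value) in inspect(values):
--         if ghost or not value:
--             continue
--         yield value
--
-- def _measure(values):
--
--     return sum(map(len, exclude(values)))
--
-- def match_index(values, fake):
--
--     if fake < 0:
--         size = _measure(values)
--         fake = size + fake
--
--     real = 0
--     for (ghost, value) in inspect(values):
--         if ghost: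
--             real += len(value)
--             continue
--         size = len(value)
--         real += min(size, fake)
--         fake -= size
--         if fake < 0:
--             break
--
--     return real
-- ===== SOURCE B (Python) =====
-- def match_index(values, fake):
--     # Two-phase: build prefix tables for the real (even-index) values in one
--     # pass stepping two at a time, then binary-search the cumulative real
--     # lengths for the first entry strictly exceeding fake.
--     full_off = []   # total length of ALL values before each real value
--     real_cum = []   # cumulative length of real values, inclusive
--     full = 0
--     total_real = 0
--     i = 0
--     n = len(values)
--     while i < n:
--         full_off.append(full)
--         total_real += len(values[i])
--         real_cum.append(total_real)
--         full += len(values[i])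
--         if i + 1 < n:
--             full += len(values[i + 1])
--         i += 2
--
--     if fake < 0:
--         fake += total_real
--
--     # first index j with real_cum[j] > fake (hand-rolled bisect_right)
--     lo, hi = 0, len(real_cum)
--     while lo < hi:
--         mid = (lo + hi) // 2
--         if real_cum[mid] > fake:
--             hi = mid
--         else:
--             lo = mid + 1
--
--     if lo == len(real_cum):
--         return full
--     prev = real_cum[lo - 1] if lo > 0 else 0
--     return full_off[lo] + (fake - prev)
-- ===== Notes on version B (the rewrite author's own statement) =====
-- stated objective: alternative
-- what changed: Replaces A's single interleaved loop (ghost/real alternation with min() and an early break) by a two-phase scheme: one pass stepping two values at a time builds prefix tables (full offsets and cumulative real lengths), then a hand-rolled binary search finds the first cumulative real length strictly exceeding fake.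
import Mathlib
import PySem

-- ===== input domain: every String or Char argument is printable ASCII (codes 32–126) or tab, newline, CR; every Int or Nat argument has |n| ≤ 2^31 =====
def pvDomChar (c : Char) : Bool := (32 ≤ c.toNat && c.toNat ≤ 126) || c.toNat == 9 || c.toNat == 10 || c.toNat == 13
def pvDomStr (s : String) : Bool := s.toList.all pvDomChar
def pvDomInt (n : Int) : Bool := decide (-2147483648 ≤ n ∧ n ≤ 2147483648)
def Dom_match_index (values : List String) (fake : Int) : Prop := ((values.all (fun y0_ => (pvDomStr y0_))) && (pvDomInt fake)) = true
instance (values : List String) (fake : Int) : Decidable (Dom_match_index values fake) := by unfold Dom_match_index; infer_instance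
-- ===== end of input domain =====

-- B replaces A's single interleaved min/early-exit loop by prefix tables built two
-- values at a time plus a hand-rolled binary search (objective: alternative).

-- ===== PORT A =====
def pv_isGhost (index : Int) : Int := PySem.Int.mod index 2

def pv_inspect (values : List String) : List (Int × String) :=
  (PySem.List.enumerate values 0).map (fun p => (pv_isGhost p.1, p.2))

def pv_exclude (values : List String) : List String :=
  ((pv_inspect values).filter (fun p => !(p.1 != 0 || p.2 == ""))).map (fun p => p.2)

def pv_measure (values : List String) : Int :=
  ((pv_exclude values).map PySem.Str.len).sum

def pv_loopA : List (Int × String) → Int → Int → Int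
  | [], real, _ => real
  | (g, v) :: rest, real, fake =>
    if g ≠ 0 then pv_loopA rest (real + PySem.Str.len v) fake
    else
      let size := PySem.Str.len v
      let real' := real + min size fake
      let fake' := fake - size
      if fake' < 0 then real' else pv_loopA rest real' fake'

def match_index (values : List String) (fake : Int) : Int :=
  let fake' := if fake < 0 then pv_measure values + fake else fake
  pv_loopA (pv_inspect values) 0 fake'

-- ===== PORT B =====
-- pv_build: Source B's while loop (i += 2): returns (full_off, real_cum, full, total_real)
def pv_build : List String → Int → Int → (List Int × List Int × Int × Int)
  | [], full, tot => ([], [], full, tot)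
  | [v], full, tot =>
      ([full], [tot + PySem.Str.len v], full + PySem.Str.len v, tot + PySem.Str.len v)
  | v :: w :: rest, full, tot =>
      let lv := PySem.Str.len v
      let r := pv_build rest (full + lv + PySem.Str.len w) (tot + lv)
      (full :: r.1, (tot + lv) :: r.2.1, r.2.2)

-- Source B's hand-rolled bisect_right while loop; the fuel hi - lo bounds the
-- number of iterations (each step shrinks hi - lo), keeping the recursion structural
def pv_bsearchF (cum : List Int) (fake : Int) : Nat → Nat → Nat → Nat
  | 0, lo, _ => lo
  | fuel + 1, lo, hi =>
    if lo < hi then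
      let mid := (lo + hi) / 2
      if fake < cum.getD mid 0 then pv_bsearchF cum fake fuel lo mid
      else pv_bsearchF cum fake fuel (mid + 1) hi
    else lo

def pv_bsearch (cum : List Int) (fake : Int) (lo hi : Nat) : Nat :=
  pv_bsearchF cum fake (hi - lo) lo hi

def match_index_alt (values : List String) (fake : Int) : Int :=
  let t := pv_build values 0 0
  let full_off := t.1
  let real_cum := t.2.1
  let full := t.2.2.1
  let total_real := t.2.2.2
  let fake' := if fake < 0 then fake + total_real else fake
  let lo := pv_bsearch real_cum fake' 0 real_cum.length
  if lo = real_cum.length then full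
  else
    let prev := if lo > 0 then real_cum.getD (lo - 1) 0 else 0
    full_off.getD lo 0 + (fake' - prev)

-- ===== PRECONDITION & SPEC =====
def Spec_match_index (values : List String) (fake : Int) (out : Int) : Prop := out = match_index_alt values fake
instance (values : List String) (fake : Int) (out : Int) : Decidable (Spec_match_index values fake out) := by unfold Spec_match_index; infer_instance

-- ===== CLAIM (what is proved, stated in full; the proofs are below) =====
def Claim_equal_match_index : Prop := ∀ (values : List String) (fake : Int), Dom_match_index values fake → Spec_match_index values fake (match_index values fake)

-- ===== LEMMAS AND PROOFS =====

-- abstract one-pass semantics: contribution of the remaining values, flag = current index is ghost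
def pv_fA : Bool → List String → Int → Int
  | _, [], _ => 0
  | true, v :: rest, fake => PySem.Str.len v + pv_fA false rest fake
  | false, v :: rest, fake =>
      if fake < PySem.Str.len v then fake
      else PySem.Str.len v + pv_fA true rest (fake - PySem.Str.len v)

-- total length of the real (even-position) values
def pv_tot : Bool → List String → Int
  | _, [] => 0
  | true, _ :: rest => pv_tot false rest
  | false, v :: rest => PySem.Str.len v + pv_tot true rest

-- linear reading of B's tables (first cumulative exceeding fake)
def pv_ans (prev : Int) : List Int → List Int → Int → Int → Int
  | o :: fo, c :: rc, ft, fake =>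
      if fake < c then o + (fake - prev) else pv_ans c fo rc ft fake
  | _, _, ft, _ => ft


theorem len_nonneg (v : String) : 0 ≤ PySem.Str.len v := by
  simp [PySem.Str.len_eq]

theorem loopA_enum (values : List String) : ∀ (s real fake : Int),
    pv_loopA ((PySem.List.enumerate values s).map (fun p => (pv_isGhost p.1, p.2))) real fake
      = real + pv_fA (decide (PySem.Int.mod s 2 ≠ 0)) values fake := by
  induction values with
  | nil =>
    intro s real fake
    cases h : decide (PySem.Int.mod s 2 ≠ 0) <;>
      simp [pv_loopA, pv_fA, PySem.List.enumerate_nil]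
  | cons v rest ih =>
    intro s real fake
    have hm : PySem.Int.mod s 2 = s % 2 := PySem.Int.mod_eq_emod_of_pos (by norm_num)
    have hm1 : PySem.Int.mod (s + 1) 2 = (s + 1) % 2 := PySem.Int.mod_eq_emod_of_pos (by norm_num)
    rw [PySem.List.enumerate_cons]
    simp only [List.map_cons, pv_loopA]
    by_cases hg : s % 2 = 0
    · have h1 : (s + 1) % 2 ≠ 0 := by omega
      rw [if_neg (by simp [pv_isGhost, hm, hg])]
      rw [show (decide (PySem.Int.mod s 2 ≠ 0)) = false from by simp [hm, hg]]
      by_cases hf : fake - PySem.Str.len v < 0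
      · rw [if_pos hf, min_eq_right (by omega)]
        simp only [pv_fA]
        rw [if_pos (by omega : fake < PySem.Str.len v)]
      · rw [if_neg hf, min_eq_left (by omega)]
        rw [ih (s + 1)]
        rw [show (decide (PySem.Int.mod (s + 1) 2 ≠ 0)) = true from by simp [hm1, h1]]
        simp only [pv_fA]
        rw [if_neg (by omega : ¬ fake < PySem.Str.len v)]
        ring
    · have h1 : (s + 1) % 2 = 0 := by omega
      rw [if_pos (by simp [pv_isGhost, hm, hg])]
      rw [ih (s + 1)]
      rw [show (decide (PySem.Int.mod (s + 1) 2 ≠ 0)) = false from by simp [hm1, h1]]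
      rw [show (decide (PySem.Int.mod s 2 ≠ 0)) = true from by simp [hm, hg]]
      simp only [pv_fA]
      ring

theorem measure_enum (values : List String) : ∀ (s : Int),
    (((((PySem.List.enumerate values s).map (fun p => (pv_isGhost p.1, p.2))).filter
        (fun p => !(p.1 != 0 || p.2 == ""))).map (fun p => p.2)).map PySem.Str.len).sum
      = pv_tot (decide (PySem.Int.mod s 2 ≠ 0)) values := by
  induction values with
  | nil =>
    intro s
    cases h : decide (PySem.Int.mod s 2 ≠ 0) <;>
      simp [pv_tot, PySem.List.enumerate_nil]
  | cons v rest ih =>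
    intro s
    have hm : PySem.Int.mod s 2 = s % 2 := PySem.Int.mod_eq_emod_of_pos (by norm_num)
    have hm1 : PySem.Int.mod (s + 1) 2 = (s + 1) % 2 := PySem.Int.mod_eq_emod_of_pos (by norm_num)
    rw [PySem.List.enumerate_cons]
    simp only [List.map_cons, List.filter_cons]
    by_cases hg : s % 2 = 0
    · have h1 : (s + 1) % 2 ≠ 0 := by omega
      rw [show (decide (PySem.Int.mod s 2 ≠ 0)) = false from by simp [hm, hg]]
      by_cases hv : v = ""
      · rw [if_neg (by simp [pv_isGhost, hm, hg, hv])]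
        rw [ih (s + 1)]
        rw [show (decide (PySem.Int.mod (s + 1) 2 ≠ 0)) = true from by simp [hm1, h1]]
        simp [pv_tot, hv, PySem.Str.len_eq]
      · rw [if_pos (by simp [pv_isGhost, hm, hg, hv])]
        simp only [List.map_cons, List.sum_cons]
        rw [ih (s + 1)]
        rw [show (decide (PySem.Int.mod (s + 1) 2 ≠ 0)) = true from by simp [hm1, h1]]
        simp [pv_tot]
    · have h1 : (s + 1) % 2 = 0 := by omega
      rw [show (decide (PySem.Int.mod s 2 ≠ 0)) = true from by simp [hm, hg]]
      rw [if_neg (by simp [pv_isGhost, hm, hg])]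
      rw [ih (s + 1)]
      rw [show (decide (PySem.Int.mod (s + 1) 2 ≠ 0)) = false from by simp [hm1, h1]]
      simp [pv_tot]

theorem measure_tot (values : List String) :
    pv_measure values = pv_tot false values := by
  have h := measure_enum values 0
  have hm : PySem.Int.mod 0 2 = 0 := by
    rw [PySem.Int.mod_eq_emod_of_pos (by norm_num)]; decide
  rw [hm] at h
  simpa [pv_measure, pv_exclude, pv_inspect] using h

theorem build_tot : ∀ (values : List String) (full tot : Int),
    (pv_build values full tot).2.2.2 = tot + pv_tot false values
  | [], full, tot => by simp [pv_build, pv_tot]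
  | [v], full, tot => by simp [pv_build, pv_tot]
  | v :: w :: rest, full, tot => by
    simp only [pv_build]
    rw [build_tot rest]
    simp [pv_tot]
    ring

theorem build_len : ∀ (values : List String) (full tot : Int),
    (pv_build values full tot).1.length = (pv_build values full tot).2.1.length
  | [], full, tot => by simp [pv_build]
  | [v], full, tot => by simp [pv_build]
  | v :: w :: rest, full, tot => by
    simp only [pv_build, List.length_cons]
    rw [build_len rest]

theorem build_rc_facts : ∀ (values : List String) (full tot : Int),
    (pv_build values full tot).2.1.Pairwise (· ≤ ·) ∧
    (∀ x ∈ (pv_build values full tot).2.1, tot ≤ x)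
  | [], full, tot => by simp [pv_build]
  | [v], full, tot => by
    simp [pv_build, PySem.Str.len_eq]
  | v :: w :: rest, full, tot => by
    have ih := build_rc_facts rest (full + PySem.Str.len v + PySem.Str.len w)
      (tot + PySem.Str.len v)
    have hv := len_nonneg v
    simp only [pv_build, List.pairwise_cons, List.mem_cons]
    constructor
    · exact ⟨fun x hx => ih.2 x hx, ih.1⟩
    · rintro x (rfl | hx)
      · omega
      · have := ih.2 x hx; omega

theorem build_sorted (values : List String) (full tot : Int) :
    (pv_build values full tot).2.1.Pairwise (· ≤ ·) :=
  (build_rc_facts values full tot).1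

theorem build_ans : ∀ (values : List String) (full tot fake : Int),
    pv_ans tot (pv_build values full tot).1 (pv_build values full tot).2.1
      (pv_build values full tot).2.2.1 (tot + fake)
      = full + pv_fA false values fake
  | [], full, tot, fake => by simp [pv_build, pv_ans, pv_fA]
  | [v], full, tot, fake => by
    by_cases h : fake < PySem.Str.len v
    · simp only [pv_build, pv_ans, pv_fA]
      rw [if_pos (by omega), if_pos h]
      ring
    · simp only [pv_build, pv_ans, pv_fA]
      rw [if_neg (by omega), if_neg h]
      simp [pv_ans, pv_fA]
  | v :: w :: rest, full, tot, fake => by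
    by_cases h : fake < PySem.Str.len v
    · simp only [pv_build, pv_ans, pv_fA]
      rw [if_pos (by omega), if_pos h]
      ring
    · simp only [pv_build, pv_ans, pv_fA]
      rw [if_neg (by omega), if_neg h]
      have heq : tot + fake = (tot + PySem.Str.len v) + (fake - PySem.Str.len v) := by ring
      rw [heq, build_ans rest]
      simp [pv_fA]
      ring

theorem sorted_getD_mono (cum : List Int) (h : cum.Pairwise (· ≤ ·)) (i j : Nat)
    (hij : i ≤ j) (hj : j < cum.length) : cum.getD i 0 ≤ cum.getD j 0 := by
  rw [List.getD_eq_getElem _ _ (lt_of_le_of_lt hij hj), List.getD_eq_getElem _ _ hj]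
  rcases Nat.eq_or_lt_of_le hij with rfl | hlt
  · exact le_refl _
  · exact List.pairwise_iff_getElem.mp h i j (lt_of_le_of_lt hij hj) hj hlt

theorem bsearchF_spec (cum : List Int) (fake : Int) : ∀ (fuel lo hi : Nat),
    hi - lo ≤ fuel → cum.Pairwise (· ≤ ·) → lo ≤ hi → hi ≤ cum.length →
    (∀ k < lo, cum.getD k 0 ≤ fake) →
    (∀ k, hi ≤ k → k < cum.length → fake < cum.getD k 0) →
    pv_bsearchF cum fake fuel lo hi ≤ cum.length ∧
    (∀ k < pv_bsearchF cum fake fuel lo hi, cum.getD k 0 ≤ fake) ∧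
    (∀ k, pv_bsearchF cum fake fuel lo hi ≤ k → k < cum.length → fake < cum.getD k 0) := by
  intro fuel
  induction fuel with
  | zero =>
    intro lo hi hfuel hmono hlh hhn hlo hhi
    simp only [pv_bsearchF]
    exact ⟨by omega, hlo, fun k hk1 hk2 => hhi k (by omega) hk2⟩
  | succ fuel ih =>
    intro lo hi hfuel hmono hlh hhn hlo hhi
    simp only [pv_bsearchF]
    by_cases h : lo < hi
    · rw [if_pos h]
      by_cases hc : fake < cum.getD ((lo + hi) / 2) 0
      · rw [if_pos hc]
        exact ih lo ((lo + hi) / 2) (by omega) hmono (by omega) (by omega) hlo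
          (fun k hk1 hk2 => lt_of_lt_of_le hc (sorted_getD_mono cum hmono _ k hk1 hk2))
      · rw [if_neg hc]
        exact ih ((lo + hi) / 2 + 1) hi (by omega) hmono (by omega) hhn
          (fun k hk => le_trans
            (sorted_getD_mono cum hmono k ((lo + hi) / 2) (by omega) (by omega)) (by omega))
          hhi
    · rw [if_neg h]
      exact ⟨by omega, hlo, fun k hk1 hk2 => hhi k (by omega) hk2⟩

theorem bsearch_spec (cum : List Int) (fake : Int) (lo hi : Nat)
    (hmono : cum.Pairwise (· ≤ ·)) (hlh : lo ≤ hi) (hhn : hi ≤ cum.length)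
    (hlo : ∀ k < lo, cum.getD k 0 ≤ fake)
    (hhi : ∀ k, hi ≤ k → k < cum.length → fake < cum.getD k 0) :
    pv_bsearch cum fake lo hi ≤ cum.length ∧
    (∀ k < pv_bsearch cum fake lo hi, cum.getD k 0 ≤ fake) ∧
    (∀ k, pv_bsearch cum fake lo hi ≤ k → k < cum.length → fake < cum.getD k 0) :=
  bsearchF_spec cum fake (hi - lo) lo hi (le_refl _) hmono hlh hhn hlo hhi

theorem ans_of_least : ∀ (rc fo : List Int) (ft fake prev : Int) (j : Nat),
    fo.length = rc.length → j ≤ rc.length →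
    (∀ k < j, rc.getD k 0 ≤ fake) →
    (∀ k, j ≤ k → k < rc.length → fake < rc.getD k 0) →
    pv_ans prev fo rc ft fake
      = if j = rc.length then ft
        else fo.getD j 0 + (fake - (if j = 0 then prev else rc.getD (j - 1) 0))
  | [], fo, ft, fake, prev, j, hlen, hj, h1, h2 => by
    have : j = 0 := Nat.le_zero.mp (by simpa using hj)
    subst this
    have : fo = [] := List.length_eq_zero_iff.mp (by simpa using hlen)
    subst this
    simp [pv_ans]
  | c :: rc', fo, ft, fake, prev, j, hlen, hj, h1, h2 => by
    match fo with
    | [] => simp at hlen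
    | o :: fo' =>
      by_cases hc : fake < c
      · have hj0 : j = 0 := by
          by_contra hne
          have := h1 0 (by omega)
          simp [List.getD_cons_zero] at this
          omega
        subst hj0
        simp only [pv_ans, if_pos hc]
        rw [if_neg (by simp)]
        simp
      · have hjne : j ≠ 0 := by
          intro hj0
          subst hj0
          have := h2 0 (le_refl _) (by simp)
          simp [List.getD_cons_zero] at this
          omega
        obtain ⟨j', rfl⟩ : ∃ j'', j = j'' + 1 := ⟨j - 1, by omega⟩
        simp only [pv_ans, if_neg hc]
        rw [ans_of_least rc' fo' ft fake c j' (by simpa using hlen) (by simpa using hj)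
          (fun k hk => by simpa using h1 (k + 1) (by omega))
          (fun k hk1 hk2 => by simpa using h2 (k + 1) (by omega) (by simpa using hk2))]
        have hprev : (if j' = 0 then c else rc'.getD (j' - 1) 0)
            = (c :: rc').getD j' 0 := by
          cases j' with
          | zero => simp
          | succ k => simp
        rw [hprev]
        by_cases hend : j' = rc'.length
        · rw [if_pos hend, if_pos (by simp [hend])]
        · rw [if_neg hend, if_neg (by simp [hend]), if_neg (by omega)]
          simp

-- ===== VERDICT (by name: the statement is the Claim_ definition above) =====
theorem match_index_spec : Claim_equal_match_index := by
  intro values fake _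
  unfold Spec_match_index
  -- A side
  have hm0 : PySem.Int.mod 0 2 = 0 := by
    rw [PySem.Int.mod_eq_emod_of_pos (by norm_num)]; decide
  have hA : match_index values fake
      = pv_fA false values (if fake < 0 then pv_tot false values + fake else fake) := by
    unfold match_index pv_inspect
    rw [loopA_enum values 0 0]
    simp [hm0, measure_tot]
  -- B side
  set fake' := if fake < 0 then pv_tot false values + fake else fake with hfake'
  have hB : match_index_alt values fake = pv_fA false values fake' := by
    unfold match_index_alt
    have htot : (pv_build values 0 0).2.2.2 = pv_tot false values := by
      rw [build_tot]; ring
    have hsw : (if fake < 0 then fake + (pv_build values 0 0).2.2.2 else fake) = fake' := by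
      rw [htot, hfake']
      split_ifs <;> ring
    simp only [hsw]
    have hfacts := bsearch_spec (pv_build values 0 0).2.1 fake' 0
      (pv_build values 0 0).2.1.length (build_sorted values 0 0) (by omega) (le_refl _)
      (by omega) (by omega)
    have hans := ans_of_least (pv_build values 0 0).2.1 (pv_build values 0 0).1
      (pv_build values 0 0).2.2.1 fake' 0
      (pv_bsearch (pv_build values 0 0).2.1 fake' 0 (pv_build values 0 0).2.1.length)
      (build_len values 0 0) hfacts.1 hfacts.2.1 hfacts.2.2
    have hba := build_ans values 0 0 fake'
    rw [zero_add, zero_add] at hba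
    rw [hans] at hba
    rw [← hba]
    set j := pv_bsearch (pv_build values 0 0).2.1 fake' 0 (pv_build values 0 0).2.1.length
    by_cases hend : j = (pv_build values 0 0).2.1.length
    · rw [if_pos hend, if_pos hend]
    · rw [if_neg hend, if_neg hend]
      by_cases hj0 : j = 0
      · rw [if_pos hj0, if_neg (by omega)]
      · rw [if_neg hj0, if_pos (by omega)]
  rw [hA, hB]
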